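-- pv_equiv track=rewrite | github.com/deeasspee/teesra | newsletter.py | select_newsletter_articles
-- ===== SOURCE A (Python) =====
-- from collections import defaultdict
--
-- def select_newsletter_articles(articles: list, target: int = 15) -> list:
--     """
--     Pick 12-15 articles with topic diversity for the newsletter.
--     Score is not stored in Supabase, so use type-based caps.
--     Max: political=3, general=3, sports=2, tech=2, international=2, sensitive=1.
--     """
--     type_caps = {
--         "political":     3,
--         "general":       3,
--         "sports":        2,
--         "tech":          2,
--         "international": 2,
--         "sensitive":     1,
--     }
--     type_counts = defaultdict(int)
--     selected = []
--
--     for article in articles: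
--         if len(selected) >= target:
--             break
--         t = article.get("story_type", "general")
--         cap = type_caps.get(t, 2)
--         if type_counts[t] < cap:
--             selected.append(article)
--             type_counts[t] += 1
--
--     # If still under 12, top up without caps
--     if len(selected) < 12:
--         used_ids = {id(a) for a in selected}
--         for article in articles:
--             if len(selected) >= target:
--                 break
--             if id(article) not in used_ids:
--                 selected.append(article)
--
--     return selected
-- ===== SOURCE B (Python) =====
-- def select_newsletter_articles(articles: list, target: int = 15) -> list:
--     """Group-by decomposition: bucket article positions by story type, keep the
--     first cap(t) of each bucket, merge back in original order, slice to target,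
--     then top up from the rest (id-based skip, as in the original)."""
--     def _cap(t):
--         if t == "sensitive":
--             return 1
--         if t in ("political", "general"):
--             return 3
--         return 2
--
--     buckets = {}
--     for i, a in enumerate(articles):
--         buckets.setdefault(a.get("story_type", "general"), []).append((i, a))
--     kept = sorted((p for t, ps in buckets.items() for p in ps[:_cap(t)]),
--                   key=lambda p: p[0])
--     selected = [a for _, a in kept[:target]] if target > 0 else []
--     if len(selected) < 12:
--         used = {id(a) for a in selected}
--         extra = [a for a in articles if id(a) not in used]
--         selected += extra[:max(target - len(selected), 0)]
--     return selected
-- ===== Notes on version B (the rewrite author's own statement) =====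
-- stated objective: alternative
-- what changed: A's sequential counts-threading scan with break plus a second full-list id-skipping loop become a group-by decomposition: bucket article positions by story type, keep the first cap(t) of each bucket, merge the buckets back in original order with a sort on the index, slice to target, and top up by a filter + slice instead of a loop.
import Mathlib
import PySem

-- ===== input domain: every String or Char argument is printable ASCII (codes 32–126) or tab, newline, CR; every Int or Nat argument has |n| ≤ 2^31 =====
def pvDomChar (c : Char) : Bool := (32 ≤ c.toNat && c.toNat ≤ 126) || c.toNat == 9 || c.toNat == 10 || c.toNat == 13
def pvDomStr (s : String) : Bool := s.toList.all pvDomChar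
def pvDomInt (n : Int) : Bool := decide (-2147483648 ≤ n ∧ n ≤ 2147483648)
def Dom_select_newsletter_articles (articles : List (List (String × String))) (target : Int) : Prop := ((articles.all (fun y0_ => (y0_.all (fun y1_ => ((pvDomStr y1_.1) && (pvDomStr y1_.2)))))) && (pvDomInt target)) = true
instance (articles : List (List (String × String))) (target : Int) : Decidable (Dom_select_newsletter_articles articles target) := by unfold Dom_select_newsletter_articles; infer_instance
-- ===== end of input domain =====

-- B replaces A's two sequential scans (a counts-threading loop with break, then an
-- id-skipping rescan) by a group-by decomposition: bucket positions by story type,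
-- keep the first cap(t) of each bucket, merge back by index with sorted, slice to
-- target and top up by a filter + slice; return values proved equal.
-- Python object identity (id(...)) is modelled by the position index: both ports run
-- on the enumerated list and `id(a) in used` becomes membership of the index — exact
-- for inputs built from literals, where distinct list positions hold distinct objects.

-- ===== PORT A =====
def pvTypeCaps : PySem.Dict String Int :=
  PySem.Dict.ofList [("political", 3), ("general", 3), ("sports", 2), ("tech", 2), ("international", 2), ("sensitive", 1)]

-- article.get("story_type", "general")  (articles are Python dicts → PySem.Dict lookup)
def pvStoryType (a : List (String × String)) : String :=
  (PySem.Dict.ofList a).getD "story_type" "general"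

-- A's first loop: capped selection with `break` once len(selected) >= target
def aCapLoop (l : List (Int × List (String × String))) (target : Int)
    (counts : PySem.Dict String Int) (sel : List (Int × List (String × String))) :
    List (Int × List (String × String)) :=
  match l with
  | [] => sel
  | (i, a) :: rest =>
    if (sel.length : Int) ≥ target then sel
    else
      let t := pvStoryType a
      let cap := pvTypeCaps.getD t 2
      if counts.getD t 0 < cap then
        aCapLoop rest target (counts.insert t (counts.getD t 0 + 1)) (sel ++ [(i, a)])
      else
        aCapLoop rest target counts sel

-- A's top-up loop: scans ALL articles again, skipping already-selected objects by id
def aTopUp (l : List (Int × List (String × String))) (target : Int)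
    (used : List Int) (sel : List (Int × List (String × String))) :
    List (Int × List (String × String)) :=
  match l with
  | [] => sel
  | (i, a) :: rest =>
    if (sel.length : Int) ≥ target then sel
    else if i ∈ used then aTopUp rest target used sel
    else aTopUp rest target used (sel ++ [(i, a)])

def select_newsletter_articles (articles : List (List (String × String))) (target : Int) : List (List (String × String)) :=
  let enum := PySem.List.enumerate articles 0
  let sel := aCapLoop enum target PySem.Dict.empty []
  let sel' := if (sel.length : Int) < 12 then aTopUp enum target (sel.map (·.1)) sel else sel
  sel'.map (·.2)

-- ===== PORT B =====
-- Source B's _cap: the per-type cap written as an if-chain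
def bCap (t : String) : Int :=
  if t == "sensitive" then 1
  else if t == "political" || t == "general" then 3
  else 2

def select_newsletter_articles_alt (articles : List (List (String × String))) (target : Int) : List (List (String × String)) :=
  let enum := PySem.List.enumerate articles 0
  -- buckets.setdefault(a.get("story_type", "general"), []).append((i, a))
  let buckets := enum.foldl
      (fun g p => g.modify (pvStoryType p.2) [] (fun v => v ++ [p]))
      (PySem.Dict.empty : PySem.Dict String (List (Int × List (String × String))))
  -- kept = sorted of the first _cap(t) pairs of each bucket, by original index
  let kept := PySem.List.sorted
      (buckets.items.flatMap (fun tp => PySem.List.slice tp.2 none (some (bCap tp.1))))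
      (fun p => p.1)
  let sel := if 0 < target then PySem.List.slice kept none (some target) else []
  let sel' := if (sel.length : Int) < 12 then
      let used := sel.map (·.1)
      let extra := enum.filter (fun p => decide (p.1 ∉ used))
      sel ++ PySem.List.slice extra none (some (max (target - (sel.length : Int)) 0))
    else sel
  sel'.map (·.2)

-- ===== PRECONDITION & SPEC =====
def Spec_select_newsletter_articles (articles : List (List (String × String))) (target : Int) (out : List (List (String × String))) : Prop := out = select_newsletter_articles_alt articles target
instance (articles : List (List (String × String))) (target : Int) (out : List (List (String × String))) : Decidable (Spec_select_newsletter_articles articles target out) := by unfold Spec_select_newsletter_articles; infer_instance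

-- ===== CLAIM (what is proved, stated in full; the proofs are below) =====
def Claim_equal_select_newsletter_articles : Prop := ∀ (articles : List (List (String × String))) (target : Int), Dom_select_newsletter_articles articles target → Spec_select_newsletter_articles articles target (select_newsletter_articles articles target)

-- ===== LEMMAS AND PROOFS =====

-- proof-side abbreviation for an enumerated article
abbrev ArtE := Int × List (String × String)

-- the two renderings of the cap table agree
theorem cap_eq (t : String) : pvTypeCaps.getD t 2 = bCap t := by
  by_cases h1 : t = "political"; · subst h1; decide
  by_cases h2 : t = "general"; · subst h2; decide
  by_cases h3 : t = "sports"; · subst h3; decide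
  by_cases h4 : t = "tech"; · subst h4; decide
  by_cases h5 : t = "international"; · subst h5; decide
  by_cases h6 : t = "sensitive"; · subst h6; decide
  have hb : bCap t = 2 := by simp [bCap, h1, h2, h6]
  rw [hb]
  simp [pvTypeCaps, PySem.Dict.ofList, PySem.Dict.update, PySem.Dict.getD_insert, h1, h2, h3, h4, h5, h6]

-- the cap is a natural number
theorem bCap_toNat (t : String) : (((bCap t).toNat : Nat) : Int) = bCap t := by
  unfold bCap; split_ifs <;> decide

-- proof-side spec: the full within-cap subsequence of l under counts c
def selW : List ArtE → PySem.Dict String Int → List ArtE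
  | [], _ => []
  | p :: rest, c =>
    if c.getD (pvStoryType p.2) 0 < pvTypeCaps.getD (pvStoryType p.2) 2 then
      p :: selW rest (c.insert (pvStoryType p.2) (c.getD (pvStoryType p.2) 0 + 1))
    else selW rest c

-- A's capped loop = take target of the within-cap subsequence
theorem aCapLoop_eq_take (l : List ArtE) (target : Int)
    (c : PySem.Dict String Int) (sel : List ArtE) :
    aCapLoop l target c sel = sel ++ (selW l c).take (target - sel.length).toNat := by
  induction l generalizing c sel with
  | nil => simp [aCapLoop, selW]
  | cons p rest ih =>
    obtain ⟨i, a⟩ := p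
    simp only [aCapLoop, selW]
    by_cases hge : (sel.length : Int) ≥ target
    · have h0 : (target - (sel.length : Int)).toNat = 0 := by omega
      simp [hge, h0]
    · by_cases hcap : c.getD (pvStoryType a) 0 < pvTypeCaps.getD (pvStoryType a) 2
      · have h1 : (target - (sel.length : Int)).toNat
            = (target - ((sel ++ [(i, a)]).length : Int)).toNat + 1 := by
          simp only [List.length_append, List.length_cons, List.length_nil]
          omega
        simp only [hge, hcap, if_pos, ite_true, ite_false, if_neg]
        rw [ih]
        simp [h1]
      · simp only [hge, hcap, if_neg, if_false, ite_false]
        rw [ih]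

-- A's top-up = take of the filtered remainder
theorem aTopUp_eq_take (l : List ArtE) (target : Int) (used : List Int) (sel : List ArtE) :
    aTopUp l target used sel
      = sel ++ (l.filter (fun p => decide (p.1 ∉ used))).take (target - sel.length).toNat := by
  induction l generalizing sel with
  | nil => simp [aTopUp]
  | cons p rest ih =>
    obtain ⟨i, a⟩ := p
    simp only [aTopUp]
    by_cases hge : (sel.length : Int) ≥ target
    · have h0 : (target - (sel.length : Int)).toNat = 0 := by omega
      simp [hge, h0]
    · by_cases hmem : i ∈ used
      · simp only [hge, hmem, if_neg, ite_true, ite_false, List.filter_cons]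
        rw [ih]
        simp [hmem]
      · have h1 : (target - (sel.length : Int)).toNat
            = (target - ((sel ++ [(i, a)]).length : Int)).toNat + 1 := by
          simp only [List.length_append, List.length_cons, List.length_nil]
          omega
        simp only [hge, hmem, if_neg, ite_false, List.filter_cons]
        rw [ih]
        simp [hmem, h1]

-- per-type slice of the within-cap subsequence: first (cap - count) of that type
theorem selW_filter (l : List ArtE) (c : PySem.Dict String Int) (t : String) :
    (selW l c).filter (fun p => pvStoryType p.2 == t)
      = (l.filter (fun p => pvStoryType p.2 == t)).take (pvTypeCaps.getD t 2 - c.getD t 0).toNat := by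
  induction l generalizing c with
  | nil => simp [selW]
  | cons p rest ih =>
    simp only [selW, List.filter_cons]
    by_cases ht : pvStoryType p.2 = t
    · by_cases hcap : c.getD (pvStoryType p.2) 0 < pvTypeCaps.getD (pvStoryType p.2) 2
      · rw [ht] at hcap
        have h1 : (pvTypeCaps.getD t 2 - c.getD t 0).toNat
            = (pvTypeCaps.getD t 2 - (c.getD t 0 + 1)).toNat + 1 := by omega
        simp only [ht, hcap, if_pos, List.filter_cons, beq_self_eq_true, if_true, ite_true]
        rw [ih]
        simp [ht, PySem.Dict.getD_insert, h1]
      · rw [ht] at hcap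
        have h0 : (pvTypeCaps.getD t 2 - c.getD t 0).toNat = 0 := by omega
        simp only [ht, hcap, if_neg, ite_false, beq_self_eq_true, ite_true, h0, List.take_zero]
        rw [ih]
        simp [h0]
    · have hne : (pvStoryType p.2 == t) = false := by simp [ht]
      by_cases hcap : c.getD (pvStoryType p.2) 0 < pvTypeCaps.getD (pvStoryType p.2) 2
      · have ht' : ¬ t = pvStoryType p.2 := fun h => ht h.symm
        simp only [hcap, if_pos, ite_true, List.filter_cons, hne, if_false, ite_false]
        rw [ih]
        simp [PySem.Dict.getD_insert, ht', hne]
      · simp [hcap, hne, ih]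

theorem selW_sublist (l : List ArtE) (c : PySem.Dict String Int) : (selW l c).Sublist l := by
  induction l generalizing c with
  | nil => simp [selW]
  | cons p rest ih =>
    simp only [selW]
    split
    · exact (ih _).cons₂ p
    · exact (ih _).cons p

-- generic: a flatMap over a list equals a flatMap over its image
theorem flatMap_map_congr {α β γ : Type} (l : List α) (h : α → β) (f : α → List γ) (g : β → List γ)
    (hfg : ∀ x ∈ l, f x = g (h x)) : l.flatMap f = (l.map h).flatMap g := by
  induction l with
  | nil => rfl
  | cons x rest ih =>
    simp only [List.flatMap_cons, List.map_cons, hfg x (by simp)]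
    rw [ih (fun y hy => hfg y (by simp [hy]))]

-- generic partition-by-key permutation
theorem flatMap_filter_perm {α : Type} (K : List String) (typ : α → String) (ys : List α)
    (hK : K.Nodup) (hmem : ∀ y ∈ ys, typ y ∈ K) :
    (K.flatMap (fun t => ys.filter (fun p => typ p == t))).Perm ys := by
  induction K generalizing ys with
  | nil =>
    cases ys with
    | nil => simp
    | cons y ys' => exact absurd (hmem y (by simp)) (by simp)
  | cons t K' ih =>
    simp only [List.flatMap_cons]
    have hrest : ∀ t' ∈ K', ys.filter (fun p => typ p == t')
        = (ys.filter (fun p => !(typ p == t))).filter (fun p => typ p == t') := by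
      intro t' ht'
      have htne : t ≠ t' := fun h => (List.pairwise_cons.mp hK).1 t' ht' h
      rw [List.filter_filter]
      apply List.filter_congr
      intro p _
      by_cases h : typ p = t'
      · simp [h, htne.symm]
      · simp [h]
    have hflat : K'.flatMap (fun t' => ys.filter (fun p => typ p == t'))
        = K'.flatMap (fun t' => (ys.filter (fun p => !(typ p == t))).filter (fun p => typ p == t')) :=
      List.flatMap_congr hrest
    rw [hflat]
    have hm : ∀ y ∈ ys.filter (fun p => !(typ p == t)), typ y ∈ K' := by
      intro y hy
      have hyy := List.mem_filter.mp hy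
      have := hmem y hyy.1
      simp only [List.mem_cons] at this
      rcases this with h | h
      · exact absurd h (by simpa using hyy.2)
      · exact h
    have hperm := ih (ys.filter (fun p => !(typ p == t))) ((List.pairwise_cons.mp hK).2) hm
    exact (hperm.append_left (ys.filter (fun p => typ p == t))).trans
      (List.filter_append_perm (fun p => typ p == t) ys)

-- the bucket of type t is the type-t subsequence of l
theorem bucket_getD (l : List ArtE) (t : String) :
    (l.foldl (fun g p => g.modify (pvStoryType p.2) [] (fun v => v ++ [p]))
      (PySem.Dict.empty : PySem.Dict String (List ArtE))).getD t []
      = l.filter (fun p => pvStoryType p.2 == t) := by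
  have h := PySem.Dict.getD_foldl_modify_append (l.map (fun p => (pvStoryType p.2, p)))
      (PySem.Dict.empty : PySem.Dict String (List ArtE)) t
  rw [List.foldl_map] at h
  simp only [PySem.Dict.getD_empty, List.nil_append, List.filter_map, List.map_map] at h
  rw [h]
  simp [Function.comp_def]

-- the heart: B's sorted merge of capped buckets = the within-cap subsequence
theorem kept_eq (l : List ArtE) (hpw : l.Pairwise (fun p q => p.1 < q.1)) :
    PySem.List.sorted
      ((l.foldl (fun g p => g.modify (pvStoryType p.2) [] (fun v => v ++ [p]))
          (PySem.Dict.empty : PySem.Dict String (List ArtE))).items.flatMap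
        (fun tp => PySem.List.slice tp.2 none (some (bCap tp.1))))
      (fun p => p.1)
      = selW l PySem.Dict.empty := by
  set d := l.foldl (fun g p => g.modify (pvStoryType p.2) [] (fun v => v ++ [p]))
      (PySem.Dict.empty : PySem.Dict String (List ArtE)) with hd
  have hnodup : d.keys.Nodup := by
    rw [hd]
    exact PySem.Dict.nodup_keys_foldl_modify_key l (fun p => pvStoryType p.2) []
      (fun _ p => (fun v => v ++ [p])) PySem.Dict.empty (by simp)
  have hkeys : d.keys = PySem.Set.ofList (l.map (fun p => pvStoryType p.2)) := by
    rw [hd]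
    rw [PySem.Dict.keys_foldl_modify_key l (fun p => pvStoryType p.2) []
      (fun _ p => (fun v => v ++ [p])) PySem.Dict.empty]
    rw [PySem.Set.ofList_eq_foldl]
    rfl
  have h1 : ∀ tp ∈ d.items, PySem.List.slice tp.2 none (some (bCap tp.1))
      = (selW l PySem.Dict.empty).filter (fun p => pvStoryType p.2 == tp.1) := by
    intro tp htp
    obtain ⟨k, v⟩ := tp
    have hv : d.getD k [] = v := PySem.Dict.getD_of_mem_items d htp hnodup []
    have hb : d.getD k [] = l.filter (fun p => pvStoryType p.2 == k) := bucket_getD l k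
    rw [← bCap_toNat k, PySem.List.slice_to_natCast, selW_filter l PySem.Dict.empty k]
    rw [← hv, hb]
    simp [PySem.Dict.getD_empty, cap_eq]
  have hflat : d.items.flatMap (fun tp => PySem.List.slice tp.2 none (some (bCap tp.1)))
      = d.keys.flatMap (fun t => (selW l PySem.Dict.empty).filter (fun p => pvStoryType p.2 == t)) := by
    rw [flatMap_map_congr d.items (fun tp => tp.1)
      (fun tp => PySem.List.slice tp.2 none (some (bCap tp.1)))
      (fun t => (selW l PySem.Dict.empty).filter (fun p => pvStoryType p.2 == t)) h1]
    rfl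
  rw [hflat]
  apply PySem.List.sorted_eq_of_perm_of_pairwise_lt
  · refine (flatMap_filter_perm d.keys (fun p => pvStoryType p.2) (selW l PySem.Dict.empty) hnodup ?_).symm
    intro y hy
    rw [hkeys, PySem.Set.mem_ofList]
    exact List.mem_map_of_mem ((selW_sublist l PySem.Dict.empty).subset hy)
  · exact hpw.sublist (selW_sublist l PySem.Dict.empty)

theorem ports_agree (articles : List (List (String × String))) (target : Int) :
    select_newsletter_articles articles target = select_newsletter_articles_alt articles target := by
  unfold select_newsletter_articles select_newsletter_articles_alt
  dsimp only
  rw [kept_eq (PySem.List.enumerate articles 0) (PySem.List.pairwise_lt_enumerate articles 0)]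
  rw [aCapLoop_eq_take]
  have hsel : (if 0 < target
        then PySem.List.slice (selW (PySem.List.enumerate articles 0) PySem.Dict.empty) none (some target)
        else [])
      = [] ++ (selW (PySem.List.enumerate articles 0) PySem.Dict.empty).take
          (target - (([] : List ArtE).length : Int)).toNat := by
    split
    · rename_i hpos
      have ht : target = ((target.toNat : Nat) : Int) := by omega
      rw [ht, PySem.List.slice_to_natCast]
      simp only [List.nil_append, List.length_nil, Nat.cast_zero, sub_zero, Int.toNat_natCast]
    · rename_i hneg
      have h0 : (target - (([] : List ArtE).length : Int)).toNat = 0 := by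
        simp only [List.length_nil, Nat.cast_zero, sub_zero]
        omega
      rw [h0]
      simp
  rw [← hsel]
  set s := (if 0 < target
      then PySem.List.slice (selW (PySem.List.enumerate articles 0) PySem.Dict.empty) none (some target)
      else []) with hs
  congr 1
  split
  · rw [aTopUp_eq_take]
    congr 1
    have hmax : target - (s.length : Int) = max (target - (s.length : Int)) 0
        ∨ (target - (s.length : Int)).toNat = 0 ∧ (max (target - (s.length : Int)) 0).toNat = 0 := by
      omega
    have hm : ((max (target - (s.length : Int)) 0).toNat : Int) = max (target - (s.length : Int)) 0 := by omega
    rw [← hm, PySem.List.slice_to_natCast]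
    congr 1
    omega
  · rfl

-- ===== VERDICT (by name: the statement is the Claim_ definition above) =====
theorem select_newsletter_articles_spec : Claim_equal_select_newsletter_articles := by
  intro articles target _
  unfold Spec_select_newsletter_articles
  exact ports_agree articles target
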